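-- pv_equiv track=rewrite | github.com/jigarshah2811/Python-Programming | Algo-DP/DP_SubSetSum.py | FourSumPairs
-- ===== SOURCE A (Python) =====
-- import collections
--
-- def FourSumPairs(A, B, C, D):
--     mymap = collections.defaultdict()
--     resultPairs = []
--
--     for c in C:
--         for d in D:
--             if c+d in mymap:
--                 mymap[c+d].append((c, d))
--             else:
--                 mymap[c+d] = [(c, d)]
--
--     for a in A:
--         for b in B:
--             rem = 0 - (a+b)
--             if rem in mymap:
--                 for (c, d) in mymap[rem]:
--                     resultPairs.append((a, b, c, d))
--
--     return resultPairs
-- ===== SOURCE B (Python) =====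
-- def FourSumPairs(A, B, C, D):
--     return [(a, b, c, d) for a in A for b in B for c in C for d in D if a + b + c + d == 0]
-- ===== Notes on version B (the rewrite author's own statement) =====
-- stated objective: simpler
-- what changed: Replaced the two-phase hash-map construction (group (c,d) pairs by sum, then look up -(a+b)) with a single brute-force four-level comprehension that emits (a,b,c,d) whenever the sum is zero; no auxiliary map is built and the emission order is identical.
import Mathlib
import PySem

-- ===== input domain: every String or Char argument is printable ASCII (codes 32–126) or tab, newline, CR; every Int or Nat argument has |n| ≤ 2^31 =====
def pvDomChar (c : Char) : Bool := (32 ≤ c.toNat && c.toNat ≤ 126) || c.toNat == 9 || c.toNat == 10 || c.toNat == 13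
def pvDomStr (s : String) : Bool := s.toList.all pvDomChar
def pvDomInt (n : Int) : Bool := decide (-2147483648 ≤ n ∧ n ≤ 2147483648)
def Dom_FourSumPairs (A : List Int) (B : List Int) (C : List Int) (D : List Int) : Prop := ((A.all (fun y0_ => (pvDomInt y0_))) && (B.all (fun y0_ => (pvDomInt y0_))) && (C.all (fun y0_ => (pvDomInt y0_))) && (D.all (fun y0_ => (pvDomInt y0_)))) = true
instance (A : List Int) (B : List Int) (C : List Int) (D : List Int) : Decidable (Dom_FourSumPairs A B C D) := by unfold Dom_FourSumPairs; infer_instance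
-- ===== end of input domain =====

-- B is a single brute-force four-level comprehension replacing A's two-phase hash-map
-- grouping; same return value, chosen for simplicity (not speed).

-- ===== PORT A =====
-- phase 1 loop body: 'if c+d in mymap: mymap[c+d].append((c,d)) else: mymap[c+d] = [(c,d)]'
def pvStepA (m : PySem.Dict Int (List (Int × Int))) (c d : Int) :
    PySem.Dict Int (List (Int × Int)) :=
  match m.get? (c + d) with
  | some l => m.insert (c + d) (l ++ [(c, d)])
  | none => m.insert (c + d) [(c, d)]

def FourSumPairs (A : List Int) (B : List Int) (C : List Int) (D : List Int) :
    List (Int × Int × Int × Int) :=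
  let mymap := C.foldl (fun m c => D.foldl (fun m d => pvStepA m c d) m) PySem.Dict.empty
  A.foldl (fun res a =>
    B.foldl (fun res b =>
      let rem := 0 - (a + b)
      match mymap.get? rem with
      | some l => l.foldl (fun res cd => res ++ [(a, b, cd.1, cd.2)]) res
      | none => res) res) []

-- ===== PORT B =====
def FourSumPairs_alt (A : List Int) (B : List Int) (C : List Int) (D : List Int) :
    List (Int × Int × Int × Int) :=
  A.flatMap fun a => B.flatMap fun b => C.flatMap fun c =>
    (D.filter fun d => a + b + c + d == 0).map fun d => (a, b, c, d)

-- ===== PRECONDITION & SPEC =====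
def Spec_FourSumPairs (A : List Int) (B : List Int) (C : List Int) (D : List Int) (out : List (Int × Int × Int × Int)) : Prop := out = FourSumPairs_alt A B C D
instance (A : List Int) (B : List Int) (C : List Int) (D : List Int) (out : List (Int × Int × Int × Int)) : Decidable (Spec_FourSumPairs A B C D out) := by unfold Spec_FourSumPairs; infer_instance

-- ===== CLAIM (what is proved, stated in full; the proofs are below) =====
def Claim_equal_FourSumPairs : Prop := ∀ (A : List Int) (B : List Int) (C : List Int) (D : List Int), Dom_FourSumPairs A B C D → Spec_FourSumPairs A B C D (FourSumPairs A B C D)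

-- ===== LEMMAS AND PROOFS =====

-- A's update step is a modify-with-append on the key c+d.
theorem pvStepA_eq_modify (m : PySem.Dict Int (List (Int × Int))) (c d : Int) :
    pvStepA m c d = m.modify (c + d) [] (· ++ [(c, d)]) := by
  unfold pvStepA
  rcases h : m.get? (c + d) with _ | l <;>
    simp [PySem.Dict.modify, PySem.Dict.getD_eq_get?_getD, h]

-- what phase 1's map holds at any key: the C-outer/D-inner pairs with that sum, in order
theorem pvMap_getD (C D : List Int) (k : Int) :
    (C.foldl (fun m c => D.foldl (fun m d => pvStepA m c d) m)
        (PySem.Dict.empty : PySem.Dict Int (List (Int × Int)))).getD k []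
      = ((C.flatMap fun c => D.map fun d => (c, d)).filter
          (fun cd => cd.1 + cd.2 == k)) := by
  have h : (C.foldl (fun m c => D.foldl (fun m d => pvStepA m c d) m)
        (PySem.Dict.empty : PySem.Dict Int (List (Int × Int))))
      = ((C.flatMap fun c => D.map fun d => (c + d, (c, d))).foldl
          (fun m p => m.modify p.1 [] (· ++ [p.2])) PySem.Dict.empty) := by
    rw [List.foldl_flatMap]
    refine PySem.List.foldl_congr_mem _ _ _ _ (fun m c _ => ?_)
    rw [List.foldl_map]
    exact PySem.List.foldl_congr_mem _ _ _ _ (fun m d _ => pvStepA_eq_modify m c d)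
  rw [h, PySem.Dict.getD_foldl_modify_append]
  simp [List.filter_flatMap, List.filter_map, Function.comp_def, PySem.Dict.getD_empty,
    List.map_flatMap]

-- B's innermost two comprehensions, reshaped as filter-then-map over the C×D pair list
theorem pvShape (C D : List Int) (a b : Int) :
    (C.flatMap fun c => (D.filter fun d => a + b + c + d == 0).map fun d => (a, b, c, d))
      = ((C.flatMap fun c => D.map fun d => (c, d)).filter
          (fun cd => cd.1 + cd.2 == 0 - (a + b))).map (fun cd => (a, b, cd.1, cd.2)) := by
  have hfil : ∀ c : Int, (D.filter fun d => a + b + c + d == 0)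
      = D.filter (fun d => c + d == 0 - (a + b)) := by
    intro c
    refine List.filter_congr (fun d _ => ?_)
    rw [Bool.eq_iff_iff]
    simp only [beq_iff_eq]
    omega
  simp only [hfil]
  simp [List.filter_flatMap, List.filter_map, List.map_flatMap, List.map_map, Function.comp_def]

-- the inner lookup-and-emit of phase 2 equals B's innermost two comprehensions
theorem pvInner_eq (C D : List Int) (a b : Int)
    (res : List (Int × Int × Int × Int)) :
    (match (C.foldl (fun m c => D.foldl (fun m d => pvStepA m c d) m)
        (PySem.Dict.empty : PySem.Dict Int (List (Int × Int)))).get? (0 - (a + b)) with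
      | some l => l.foldl (fun res cd => res ++ [(a, b, cd.1, cd.2)]) res
      | none => res)
      = res ++ (C.flatMap fun c =>
          (D.filter fun d => a + b + c + d == 0).map fun d => (a, b, c, d)) := by
  have key := pvMap_getD C D (0 - (a + b))
  rcases h : (C.foldl (fun m c => D.foldl (fun m d => pvStepA m c d) m)
      (PySem.Dict.empty : PySem.Dict Int (List (Int × Int)))).get? (0 - (a + b)) with _ | l
  · dsimp only
    rw [PySem.Dict.getD_eq_get?_getD, h] at key
    simp only [Option.getD_none] at key
    rw [pvShape, ← key]
    simp
  · dsimp only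
    rw [PySem.Dict.getD_eq_get?_getD, h] at key
    simp only [Option.getD_some] at key
    rw [PySem.List.foldl_append_singleton_eq_map, key, pvShape]

-- ===== VERDICT (by name: the statement is the Claim_ definition above) =====
theorem FourSumPairs_spec : Claim_equal_FourSumPairs := by
  intro A B C D _
  unfold Spec_FourSumPairs FourSumPairs FourSumPairs_alt
  have h1 : ∀ (res : List (Int × Int × Int × Int)),
      A.foldl (fun res a => B.foldl (fun res b =>
        match (C.foldl (fun m c => D.foldl (fun m d => pvStepA m c d) m)
            (PySem.Dict.empty : PySem.Dict Int (List (Int × Int)))).get? (0 - (a + b)) with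
        | some l => l.foldl (fun res cd => res ++ [(a, b, cd.1, cd.2)]) res
        | none => res) res) res
      = res ++ A.flatMap (fun a => B.flatMap fun b => C.flatMap fun c =>
          (D.filter fun d => a + b + c + d == 0).map fun d => (a, b, c, d)) := by
    intro res
    rw [show (fun res a => B.foldl (fun res b =>
        match (C.foldl (fun m c => D.foldl (fun m d => pvStepA m c d) m)
            (PySem.Dict.empty : PySem.Dict Int (List (Int × Int)))).get? (0 - (a + b)) with
        | some l => l.foldl (fun res cd => res ++ [(a, b, cd.1, cd.2)]) res
        | none => res) res)
      = (fun res a => res ++ (B.flatMap fun b => C.flatMap fun c =>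
          (D.filter fun d => a + b + c + d == 0).map fun d => (a, b, c, d))) from ?_]
    · exact PySem.List.foldl_append_eq_flatMap _ _ _
    · funext res a
      rw [show (fun res b =>
          match (C.foldl (fun m c => D.foldl (fun m d => pvStepA m c d) m)
              (PySem.Dict.empty : PySem.Dict Int (List (Int × Int)))).get? (0 - (a + b)) with
          | some l => l.foldl (fun res cd => res ++ [(a, b, cd.1, cd.2)]) res
          | none => res)
        = (fun res b => res ++ (C.flatMap fun c =>
            (D.filter fun d => a + b + c + d == 0).map fun d => (a, b, c, d))) from ?_]
      · exact PySem.List.foldl_append_eq_flatMap _ _ _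
      · funext res b
        exact pvInner_eq C D a b res
  simpa using h1 []
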